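-- pv_equiv track=rewrite | github.com/ashcastelinocs124/UrbanOps | services/processor/main.py | match_road
-- ===== SOURCE A (Python) =====
-- ROAD_ALIASES: dict[str, list[str]] = {
--     "i-90/94 (kennedy)": ["kennedy", "i-90", "i90"],
--     "i-90/94 (dan ryan)": ["dan ryan", "i-94", "i94"],
--     "i-290 (eisenhower)": ["eisenhower", "i-290", "i290"],
--     "lake shore drive": ["lsd", "dusable lake shore", "lake shore"],
--     "michigan ave": ["michigan avenue", "michigan"],
--     "state st": ["state street", "state"],
--     "clark st": ["clark street", "clark"],
--     "halsted st": ["halsted street", "halsted"],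
--     "ashland ave": ["ashland avenue", "ashland"],
--     "western ave": ["western avenue", "western"],
--     "roosevelt rd": ["roosevelt road", "roosevelt"],
--     "chicago ave": ["chicago avenue"],
--     "north ave": ["north avenue"],
--     "fullerton ave": ["fullerton avenue", "fullerton"],
-- }
--
-- def match_road(road_name: str, target: str) -> bool:
--     """Check if a road name matches a target (fuzzy, case-insensitive)."""
--     road_lower = road_name.lower()
--     target_lower = target.lower()
--     if target_lower in road_lower or road_lower in target_lower:
--         return True
--     for canonical, aliases in ROAD_ALIASES.items():
--         if target_lower in canonical or canonical in target_lower: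
--             if road_lower in canonical or canonical in road_lower:
--                 return True
--         for alias in aliases:
--             if target_lower in alias or alias in target_lower:
--                 if road_lower in canonical or canonical in road_lower:
--                     return True
--     return False
-- ===== SOURCE B (Python) =====
-- ROAD_ALIASES: dict[str, list[str]] = {
--     "i-90/94 (kennedy)": ["kennedy", "i-90", "i90"],
--     "i-90/94 (dan ryan)": ["dan ryan", "i-94", "i94"],
--     "i-290 (eisenhower)": ["eisenhower", "i-290", "i290"],
--     "lake shore drive": ["lsd", "dusable lake shore", "lake shore"],
--     "michigan ave": ["michigan avenue", "michigan"],
--     "state st": ["state street", "state"],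
--     "clark st": ["clark street", "clark"],
--     "halsted st": ["halsted street", "halsted"],
--     "ashland ave": ["ashland avenue", "ashland"],
--     "western ave": ["western avenue", "western"],
--     "roosevelt rd": ["roosevelt road", "roosevelt"],
--     "chicago ave": ["chicago avenue"],
--     "north ave": ["north avenue"],
--     "fullerton ave": ["fullerton avenue", "fullerton"],
-- }
--
--
-- def _overlap(a: str, b: str) -> bool:
--     return a in b or b in a
--
--
-- def match_road(road_name: str, target: str) -> bool:
--     """Check if a road name matches a target (fuzzy, case-insensitive)."""
--     road_lower = road_name.lower()
--     target_lower = target.lower()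
--     if target_lower in road_lower or road_lower in target_lower:
--         return True
--     # phase 1: filter the table down to the term-groups whose canonical overlaps the road
--     candidates = []
--     for canonical, aliases in ROAD_ALIASES.items():
--         if _overlap(road_lower, canonical):
--             candidates.append([canonical] + aliases)
--     # phase 2: scan the candidate groups for any term overlapping the target
--     for group in candidates:
--         for term in group:
--             if _overlap(target_lower, term):
--                 return True
--     return False
-- ===== Notes on version B (the rewrite author's own statement) =====
-- stated objective: faster
-- what changed: B replaces A's nested per-entry scan (which tests every alias of every entry and re-tests the road-vs-canonical overlap inside each alias check) with two phases: filter the alias table by the road/canonical overlap into a candidate term-group list, then scan only those groups for a target overlap.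
import Mathlib
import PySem

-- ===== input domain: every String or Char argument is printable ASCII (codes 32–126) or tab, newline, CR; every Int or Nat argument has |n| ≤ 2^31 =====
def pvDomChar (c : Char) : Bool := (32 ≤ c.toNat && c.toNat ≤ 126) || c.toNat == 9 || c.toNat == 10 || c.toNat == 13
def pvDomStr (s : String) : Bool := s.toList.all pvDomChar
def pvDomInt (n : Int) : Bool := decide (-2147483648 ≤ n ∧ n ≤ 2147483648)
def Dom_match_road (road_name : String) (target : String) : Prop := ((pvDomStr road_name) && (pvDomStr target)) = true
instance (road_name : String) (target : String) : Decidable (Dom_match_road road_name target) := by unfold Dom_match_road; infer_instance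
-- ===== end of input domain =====

-- B splits A's nested per-entry scan into two phases: filter the alias table by the
-- road/canonical overlap into candidate term-groups, then scan those for a target overlap.

-- the module-level ROAD_ALIASES dict, as an association list in insertion order
def pvRoadAliases : List (String × List String) :=
  [ ("i-90/94 (kennedy)", ["kennedy", "i-90", "i90"]),
    ("i-90/94 (dan ryan)", ["dan ryan", "i-94", "i94"]),
    ("i-290 (eisenhower)", ["eisenhower", "i-290", "i290"]),
    ("lake shore drive", ["lsd", "dusable lake shore", "lake shore"]),
    ("michigan ave", ["michigan avenue", "michigan"]),
    ("state st", ["state street", "state"]),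
    ("clark st", ["clark street", "clark"]),
    ("halsted st", ["halsted street", "halsted"]),
    ("ashland ave", ["ashland avenue", "ashland"]),
    ("western ave", ["western avenue", "western"]),
    ("roosevelt rd", ["roosevelt road", "roosevelt"]),
    ("chicago ave", ["chicago avenue"]),
    ("north ave", ["north avenue"]),
    ("fullerton ave", ["fullerton avenue", "fullerton"]) ]

-- ===== PORT A =====
-- inner 'for alias in aliases' loop, with early return True
def pvInnerA (road_lower canonical target_lower : String) : List String → Bool
  | [] => false
  | al :: rest =>
    if PySem.Str.isIn target_lower al || PySem.Str.isIn al target_lower then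
      if PySem.Str.isIn road_lower canonical || PySem.Str.isIn canonical road_lower then true
      else pvInnerA road_lower canonical target_lower rest
    else pvInnerA road_lower canonical target_lower rest

-- outer 'for canonical, aliases in ROAD_ALIASES.items()' loop
def pvLoopA (road_lower target_lower : String) : List (String × List String) → Bool
  | [] => false
  | (canonical, aliases) :: rest =>
    if (PySem.Str.isIn target_lower canonical || PySem.Str.isIn canonical target_lower) then
      if (PySem.Str.isIn road_lower canonical || PySem.Str.isIn canonical road_lower) then true
      else if pvInnerA road_lower canonical target_lower aliases then true
      else pvLoopA road_lower target_lower rest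
    else if pvInnerA road_lower canonical target_lower aliases then true
    else pvLoopA road_lower target_lower rest

def match_road (road_name : String) (target : String) : Bool :=
  let road_lower := PySem.Str.lower road_name
  let target_lower := PySem.Str.lower target
  if PySem.Str.isIn target_lower road_lower || PySem.Str.isIn road_lower target_lower then true
  else pvLoopA road_lower target_lower pvRoadAliases

-- ===== PORT B =====
def pvOverlap (a b : String) : Bool := PySem.Str.isIn a b || PySem.Str.isIn b a

-- phase 1: the candidates-building append loop
def pvCandidates (road_lower : String) : List (List String) :=
  pvRoadAliases.foldl
    (fun acc ca => if pvOverlap road_lower ca.1 then acc ++ [ca.1 :: ca.2] else acc) []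

def match_road_alt (road_name : String) (target : String) : Bool :=
  let road_lower := PySem.Str.lower road_name
  let target_lower := PySem.Str.lower target
  if PySem.Str.isIn target_lower road_lower || PySem.Str.isIn road_lower target_lower then true
  else
    -- phase 2: scan the candidate groups for any term overlapping the target
    (pvCandidates road_lower).any (fun group => group.any (fun term => pvOverlap target_lower term))

-- ===== PRECONDITION & SPEC =====
def Spec_match_road (road_name : String) (target : String) (out : Bool) : Prop := out = match_road_alt road_name target
instance (road_name : String) (target : String) (out : Bool) : Decidable (Spec_match_road road_name target out) := by unfold Spec_match_road; infer_instance

-- ===== CLAIM (what is proved, stated in full; the proofs are below) =====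
def Claim_equal_match_road : Prop := ∀ (road_name : String) (target : String), Dom_match_road road_name target → Spec_match_road road_name target (match_road road_name target)

-- ===== LEMMAS AND PROOFS =====

-- A's inner alias loop factors as (road overlaps canonical) && (target overlaps some alias)
theorem pvInnerA_eq (r c t : String) (as_ : List String) :
    pvInnerA r c t as_ =
      ((PySem.Str.isIn r c || PySem.Str.isIn c r) && as_.any (fun a => pvOverlap t a)) := by
  induction as_ with
  | nil => simp [pvInnerA]
  | cons a rest ih =>
    cases ha : PySem.Chars.isIn t.toList a.toList <;>
      cases hb : PySem.Chars.isIn a.toList t.toList <;>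
        cases hc : PySem.Chars.isIn r.toList c.toList <;>
          cases hd : PySem.Chars.isIn c.toList r.toList <;>
            simp [pvInnerA, pvOverlap, ih, ha, hb, hc, hd]

-- the candidates foldl, with any accumulator, is append of the filtered groups
theorem pvCandidates_foldl (r : String) (L : List (String × List String))
    (acc : List (List String)) :
    L.foldl (fun acc ca => if pvOverlap r ca.1 then acc ++ [ca.1 :: ca.2] else acc) acc =
      acc ++ L.filterMap (fun ca => if pvOverlap r ca.1 then some (ca.1 :: ca.2) else none) := by
  induction L generalizing acc with
  | nil => simp
  | cons ca rest ih =>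
    simp only [List.foldl_cons, List.filterMap_cons]
    by_cases h : pvOverlap r ca.1 = true
    · simp [h, ih]
    · simp [Bool.eq_false_iff.mpr h, ih]

-- the per-entry branch structure of A's loop body, as a pure Bool identity
theorem pvStep (x y z w : Bool) :
    (if x = true then (if y = true then true else if (y && z) = true then true else w)
     else if (y && z) = true then true else w)
    = (if y = true then ((x || z) || w) else w) := by
  cases x <;> cases y <;> cases z <;> cases w <;> rfl

-- A's whole table loop equals B's filter-then-scan, for any table
theorem pvLoopA_eq_phases (r t : String) (L : List (String × List String)) :
    pvLoopA r t L =
      (L.filterMap (fun ca => if pvOverlap r ca.1 then some (ca.1 :: ca.2) else none)).any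
        (fun group => group.any (fun term => pvOverlap t term)) := by
  induction L with
  | nil => simp [pvLoopA]
  | cons ca rest ih =>
    obtain ⟨c, as_⟩ := ca
    simp only [pvLoopA, List.filterMap_cons, pvOverlap]
    rw [pvInnerA_eq, ih, pvStep]
    simp only [pvOverlap]
    cases hy : (PySem.Str.isIn r c || PySem.Str.isIn c r) <;>
      simp [hy, List.any_cons, Bool.or_assoc]

-- ===== VERDICT (by name: the statement is the Claim_ definition above) =====
theorem match_road_spec : Claim_equal_match_road := by
  intro road_name target _
  unfold Spec_match_road
  simp only [match_road, match_road_alt, pvLoopA_eq_phases, pvCandidates, pvCandidates_foldl,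
    List.nil_append]
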